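-- pv_equiv track=rewrite | github.com/MRannala/Colour-mapping | Cmap_plotter-V01.py | count_Ntally
-- ===== SOURCE A (Python) =====
-- def count_Ntally(datarray):
--
--     Ntallies = 0
--     tally_numbers = []
--     tally_cord = []
--     tally_index = []
--
--     for i in range(len(datarray)):
--         linetext = datarray[i].split(' ')
--
--         # if line of file is long enough to be Mesh tally number, it is checked
--         if len(linetext) > 3 :
--             if linetext[0] + linetext[1] + linetext[2] + linetext[3] == 'MeshTallyNumber':
--                 Ntallies += 1
--                 tally_numbers.append(linetext[-1].rstrip('\n'))
--                 tc , ti = find_cord_data(datarray,i)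
--                 tally_cord.append(tc)
--                 tally_index.append(ti)
--
--     return Ntallies, tally_numbers, tally_index, tally_cord
--
-- def find_cord_data(data, start):
--
--     escp = False
--     counter = start
--
--     # Maximum 1mil lines without success
--     while escp == False and counter < 1000000:
--
--         linetext = data[counter].split()
--         if len(linetext) > 2:
--             if linetext[0] + linetext[1] == 'TallyResults:':
--                 cords = linetext[2] + linetext[5]
--                 tal_ind = counter + 1
--                 escp = True
--         counter = counter + 1
--
--     return  cords, tal_ind
-- ===== SOURCE B (Python) =====
-- def count_Ntally(datarray):
--     n = len(datarray)
--     # backward pass: nxt[i] = index of the first 'Tally Results:' line at or after i (no per-header rescan)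
--     nxt = [None] * n
--     j = None
--     for i in range(n - 1, -1, -1):
--         t = datarray[i].split()
--         if len(t) > 2 and t[0] + t[1] == 'TallyResults:':
--             j = i
--         nxt[i] = j
--     count = 0
--     numbers = []
--     indices = []
--     cords = []
--     for i, line in enumerate(datarray):
--         w = line.split(' ')
--         if len(w) > 3 and w[0] + w[1] + w[2] + w[3] == 'MeshTallyNumber':
--             count += 1
--             numbers.append(w[-1].rstrip('\n'))
--             k = nxt[i]
--             tk = datarray[k].split()
--             indices.append(k + 1)
--             cords.append(tk[2] + tk[5])
--     return count, numbers, indices, cords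
-- ===== Notes on version B (the rewrite author's own statement) =====
-- stated objective: alternative
-- what changed: A rescans forward from every header for the next 'Tally Results:' line; B precomputes in one backward pass, for every line, the index of the next 'Tally Results:' line, then collects headers in a single forward pass looking that index up.
import Mathlib
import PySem

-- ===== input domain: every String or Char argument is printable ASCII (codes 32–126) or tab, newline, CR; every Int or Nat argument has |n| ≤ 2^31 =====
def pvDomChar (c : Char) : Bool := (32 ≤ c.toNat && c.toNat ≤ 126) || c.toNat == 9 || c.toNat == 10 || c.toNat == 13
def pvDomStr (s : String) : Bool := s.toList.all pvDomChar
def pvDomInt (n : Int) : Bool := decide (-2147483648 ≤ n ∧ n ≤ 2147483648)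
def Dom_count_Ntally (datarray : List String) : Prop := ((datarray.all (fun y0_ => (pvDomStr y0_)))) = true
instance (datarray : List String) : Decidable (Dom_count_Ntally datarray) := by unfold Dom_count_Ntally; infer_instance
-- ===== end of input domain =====

-- B replaces A's per-header forward rescan for the next 'Tally Results:' line by one backward
-- pass precomputing that index for every line, then a single forward pass looking it up (alternative structure).

-- shared primitives (used by both ports and by Pre_)
-- s.rstrip('\n') — ported by hand (PySem has no single-char rstrip); exact: drops trailing '\n' code points
def pyRstripNewline (s : String) : String :=
  String.ofList ((s.toList.reverse.dropWhile (fun c => c == '\n')).reverse)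

-- the test "len(line.split(' ')) > 3 and ''.join 4 == 'MeshTallyNumber'" shared by both Pythons
def isHeaderLine (s : String) : Bool :=
  let w := (PySem.Str.split? s " ").getD []
  decide (w.length > 3) && (w.getD 0 "" ++ w.getD 1 "" ++ w.getD 2 "" ++ w.getD 3 "" == "MeshTallyNumber")

-- the test "len(line.split()) > 2 and t[0]+t[1] == 'TallyResults:'" shared by both Pythons
def isTRLine (s : String) : Bool :=
  let t := PySem.Str.split₀ s
  decide (t.length > 2) && (t.getD 0 "" ++ t.getD 1 "" == "TallyResults:")

-- ===== PORT A =====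
-- find_cord_data: while loop with counter < 1000000, ported as fuel recursion (fuel = 1000000 - counter);
-- none = the Python raises (IndexError past the end, unbound 'cords', or tokens[2]/[5] missing)
def findCordA (data : List String) : Nat → Nat → Option (String × Int)
  | 0, _ => none
  | fuel + 1, counter =>
    match data[counter]? with
    | none => none
    | some line =>
      if isTRLine line then
        let t := PySem.Str.split₀ line
        match PySem.List.pyGet? t 2, PySem.List.pyGet? t 5 with
        | some a, some b => some (a ++ b, (counter : Int) + 1)
        | _, _ => none
      else findCordA data fuel (counter + 1)

def count_Ntally (datarray : List String) : Int × List String × List Int × List String :=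
  (List.range datarray.length).foldl (fun acc i =>
    let line := datarray.getD i ""
    if isHeaderLine line then
      let w := (PySem.Str.split? line " ").getD []
      let num := pyRstripNewline ((PySem.List.pyGet? w (-1)).getD "")
      match findCordA datarray (1000000 - i) i with
      | some (tc, ti) => (acc.1 + 1, acc.2.1 ++ [num], acc.2.2.1 ++ [ti], acc.2.2.2 ++ [tc])
      | none => acc   -- Python raises here; outside Pre_
    else acc) (0, [], [], [])

-- ===== PORT B =====
-- backward pass of Source B: nxt[i] = index of first 'Tally Results:' line at or after i
def buildNxt : List (String × Nat) → Option Nat × List (Option Nat)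
  | [] => (none, [])
  | p :: rest =>
    let acc := buildNxt rest
    let j := if isTRLine p.1 then some p.2 else acc.1
    (j, j :: acc.2)

def count_Ntally_alt (datarray : List String) : Int × List String × List Int × List String :=
  let nxt := (buildNxt datarray.zipIdx).2
  datarray.zipIdx.foldl (fun acc p =>
    if isHeaderLine p.1 then
      let w := (PySem.Str.split? p.1 " ").getD []
      let num := pyRstripNewline ((PySem.List.pyGet? w (-1)).getD "")
      match nxt.getD p.2 none with
      | some k =>
        let tk := PySem.Str.split₀ (datarray.getD k "")
        (acc.1 + 1, acc.2.1 ++ [num], acc.2.2.1 ++ [((k : Int) + 1)], acc.2.2.2 ++ [tk.getD 2 "" ++ tk.getD 5 ""])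
      | none => acc   -- Python raises here; outside Pre_
    else acc) (0, [], [], [])

-- ===== PRECONDITION & SPEC =====
-- Pre_ holds exactly where the Python A returns: every header line must be followed (at or after it,
-- before index 1000000, A's hard cap) by a 'Tally Results:' line whose first such occurrence has at
-- least 6 whitespace tokens — otherwise A raises (IndexError / UnboundLocalError).
def Pre_count_Ntally (datarray : List String) : Prop :=
  ∀ i < datarray.length, isHeaderLine (datarray.getD i "") = true →
    ∃ j < datarray.length, i ≤ j ∧ j < 1000000 ∧ isTRLine (datarray.getD j "") = true ∧
      (∀ k < j, i ≤ k → isTRLine (datarray.getD k "") = false) ∧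
      6 ≤ (PySem.Str.split₀ (datarray.getD j "")).length
instance (datarray : List String) : Decidable (Pre_count_Ntally datarray) := by
  unfold Pre_count_Ntally; infer_instance

def pvWitness_count_Ntally : List String := ["Mesh Tally Number  4", "Tally Results: a b c d"]

def Spec_count_Ntally (datarray : List String) (out : Int × List String × List Int × List String) : Prop := out = count_Ntally_alt datarray
instance (datarray : List String) (out : Int × List String × List Int × List String) : Decidable (Spec_count_Ntally datarray out) := by unfold Spec_count_Ntally; infer_instance

-- ===== CLAIM (what is proved, stated in full; the proofs are below) =====
def Claim_equal_count_Ntally : Prop := ∀ (datarray : List String), Dom_count_Ntally datarray → Pre_count_Ntally datarray → Spec_count_Ntally datarray (count_Ntally datarray)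

-- ===== LEMMAS AND PROOFS =====

-- first index ≥ k (absolute) of a TR line in l (l stands for data.drop k)
def firstTRIn : List String → Nat → Option Nat
  | [], _ => none
  | s :: rest, k => if isTRLine s then some k else firstTRIn rest (k + 1)

theorem firstTRIn_ge {l : List String} {k j : Nat} (h : firstTRIn l k = some j) : k ≤ j := by
  induction l generalizing k with
  | nil => simp [firstTRIn] at h
  | cons s rest ih =>
    simp only [firstTRIn] at h
    split at h
    · cases h; exact le_rfl
    · exact Nat.le_of_succ_le (ih h)

-- Pre_'s minimal-witness shape determines firstTRIn
theorem firstTRIn_of_min (data : List String) (i j : Nat)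
    (hij : i ≤ j) (hj : j < data.length) (hTR : isTRLine (data.getD j "") = true)
    (hmin : ∀ k < j, i ≤ k → isTRLine (data.getD k "") = false) :
    firstTRIn (data.drop i) i = some j := by
  induction hle : j - i generalizing i with
  | zero =>
    have hji : j = i := by omega
    subst hji
    have hg : data[j] = data.getD j "" := by simp [List.getD, List.getElem?_eq_getElem hj]
    rw [List.drop_eq_getElem_cons hj]
    simp only [firstTRIn, hg, hTR, if_true]
  | succ n ih =>
    have hi : i < data.length := by omega
    rw [List.drop_eq_getElem_cons hi]
    simp only [firstTRIn]
    have hni : isTRLine data[i] = false := by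
      have := hmin i (by omega) le_rfl
      rwa [show data.getD i "" = data[i] by simp [List.getD, List.getElem?_eq_getElem hi]] at this
    rw [hni]
    simp only [Bool.false_eq_true, if_false]
    exact ih (i + 1) (by omega) (fun k hk hik => hmin k hk (by omega)) (by omega)

-- A's scan computes the payload of the first TR line
theorem findCordA_eq (data : List String) (fuel : Nat) :
    ∀ (i j : Nat), firstTRIn (data.drop i) i = some j → j < i + fuel → j < data.length →
      6 ≤ (PySem.Str.split₀ (data.getD j "")).length →
      findCordA data fuel i =
        some ((PySem.Str.split₀ (data.getD j "")).getD 2 "" ++ (PySem.Str.split₀ (data.getD j "")).getD 5 "",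
              (j : Int) + 1) := by
  induction fuel with
  | zero => intro i j h hlt _ _; have := firstTRIn_ge h; omega
  | succ f ih =>
    intro i j h hlt hjn h6
    have hi : i ≤ j := firstTRIn_ge h
    have hin : i < data.length := by omega
    rw [List.drop_eq_getElem_cons hin] at h
    simp only [firstTRIn] at h
    have hgd : data.getD i "" = data[i] := by simp [List.getD, List.getElem?_eq_getElem hin]
    simp only [findCordA, List.getElem?_eq_getElem hin]
    by_cases hTR : isTRLine data[i] = true
    · rw [hTR] at h
      simp only [if_true] at h
      have hji : i = j := by injection h
      subst hji
      rw [hTR]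
      simp only [if_true]
      rw [hgd] at h6 ⊢
      have h2 : PySem.List.pyGet? (PySem.Str.split₀ data[i]) 2 = some ((PySem.Str.split₀ data[i]).getD 2 "") := by
        rw [show (2 : Int) = ((2 : Nat) : Int) from rfl, PySem.List.pyGet?_natCast]
        simp [List.getElem?_eq_getElem (show 2 < (PySem.Str.split₀ data[i]).length by omega), List.getD]
      have h5 : PySem.List.pyGet? (PySem.Str.split₀ data[i]) 5 = some ((PySem.Str.split₀ data[i]).getD 5 "") := by
        rw [show (5 : Int) = ((5 : Nat) : Int) from rfl, PySem.List.pyGet?_natCast]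
        simp [List.getElem?_eq_getElem (show 5 < (PySem.Str.split₀ data[i]).length by omega), List.getD]
      rw [h2, h5]
    · rw [Bool.eq_false_iff.mpr hTR] at h ⊢
      simp only [Bool.false_eq_true, if_false] at h ⊢
      exact ih (i + 1) j h (by omega) hjn h6

-- B's backward pass computes firstTRIn, entrywise
theorem buildNxt_spec (l : List String) : ∀ (k : Nat),
    (buildNxt (l.zipIdx k)).1 = firstTRIn l k ∧
    ∀ m < l.length, ((buildNxt (l.zipIdx k)).2).getD m none = firstTRIn (l.drop m) (k + m) := by
  induction l with
  | nil => intro k; exact ⟨rfl, by intro m hm; simp at hm⟩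
  | cons s rest ih =>
    intro k
    obtain ⟨ih1, ih2⟩ := ih (k + 1)
    constructor
    · simp only [List.zipIdx, buildNxt, firstTRIn, ih1]
    · intro m hm
      match m with
      | 0 =>
        simp only [List.zipIdx, buildNxt, List.getD, List.getElem?_cons_zero, Option.getD_some,
          List.drop_zero, firstTRIn, ih1, Nat.add_zero]
      | m + 1 =>
        have := ih2 m (by simpa using hm)
        simp only [List.zipIdx, buildNxt, List.getD, List.getElem?_cons_succ, List.drop_succ_cons]
        simp only [List.getD] at this
        rw [this]
        congr 1
        omega

-- fold over zipIdx = fold over range with getD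
theorem foldl_zipIdx_range {β : Type} (f : β → String × Nat → β) (l : List String) :
    ∀ (k : Nat) (init : β),
      (l.zipIdx k).foldl f init = (List.range l.length).foldl (fun acc i => f acc (l.getD i "", i + k)) init := by
  induction l with
  | nil => intro k init; rfl
  | cons s rest ih =>
    intro k init
    simp only [List.zipIdx, List.foldl_cons, List.length_cons, List.range_succ_eq_map,
      List.foldl_cons, List.foldl_map]
    rw [ih (k + 1)]
    simp only [List.getD_cons_zero, Nat.zero_add]
    apply PySem.List.foldl_congr_mem
    intro acc x _
    simp only [List.getD_cons_succ]
    congr 2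
    omega

-- ===== VERDICT (by name: the statement is the Claim_ definition above) =====
theorem count_Ntally_spec : Claim_equal_count_Ntally := by
  intro datarray _hDom hPre
  unfold Spec_count_Ntally count_Ntally count_Ntally_alt
  rw [foldl_zipIdx_range]
  apply Eq.symm
  apply PySem.List.foldl_congr_mem
  intro acc i hi
  have hin : i < datarray.length := List.mem_range.mp hi
  simp only [Nat.add_zero]
  by_cases hH : isHeaderLine (datarray.getD i "") = true
  · simp only [hH, if_true]
    obtain ⟨j, hjn, hij, hj6, hTR, hmin, h6⟩ := hPre i hin hH
    have hfirst := firstTRIn_of_min datarray i j hij hjn hTR hmin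
    have hnxt : ((buildNxt datarray.zipIdx).2).getD i none = some j := by
      have := (buildNxt_spec datarray 0).2 i hin
      rw [this]
      simpa using hfirst
    have hA := findCordA_eq datarray (1000000 - i) i j hfirst (by omega) hjn h6
    rw [hnxt, hA]
  · simp only [Bool.eq_false_iff.mpr hH, Bool.false_eq_true, if_false]
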